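-- pv_equiv track=rewrite | github.com/SmaF1-dev/Algorithms_and_Data-Structures | lab3/task3/src/main.py | sort_scarecrow
-- ===== SOURCE A (Python) =====
-- def sort_scarecrow(lst, n, k):
--     lst_arrs = [[] for _ in range(k)]
--     for i in range(n):
--         ost = i%k
--         lst_arrs[ost].append(lst[i])
--
--     lst_arrs = list(map(sorted, lst_arrs))
--     for i in range(n//k+1):
--         for j in range(k-1):
--             if len(lst_arrs[j])>i and len(lst_arrs[j+1])>i:
--                 if lst_arrs[j][i] > lst_arrs[j+1][i]:
--                     return False
--
--     return True
-- ===== SOURCE B (Python) =====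
-- def sort_scarecrow(lst, n, k):
--     # Rank-dominance check, no sorting: sorted column j row-wise dominates sorted
--     # column j+1 iff for every element y of column j+1, column j has at least as
--     # many elements <= y as column j+1 does.
--     for j in range(k - 1):
--         a = [lst[i] for i in range(j, n, k)]
--         b = [lst[i] for i in range(j + 1, n, k)]
--         for y in b:
--             if sum(x <= y for x in a) < sum(z <= y for z in b):
--                 return False
--     return True
-- ===== Notes on version B (the rewrite author's own statement) =====
-- stated objective: alternative
-- what changed: B never sorts: it replaces A's sort-each-bucket-and-compare-rows check with a rank-dominance test, verifying for each adjacent residue column pair that every element y of the right column has at least as many elements <= y in the left column, which is equivalent to the row-wise order of the sorted columns.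
import Mathlib
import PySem

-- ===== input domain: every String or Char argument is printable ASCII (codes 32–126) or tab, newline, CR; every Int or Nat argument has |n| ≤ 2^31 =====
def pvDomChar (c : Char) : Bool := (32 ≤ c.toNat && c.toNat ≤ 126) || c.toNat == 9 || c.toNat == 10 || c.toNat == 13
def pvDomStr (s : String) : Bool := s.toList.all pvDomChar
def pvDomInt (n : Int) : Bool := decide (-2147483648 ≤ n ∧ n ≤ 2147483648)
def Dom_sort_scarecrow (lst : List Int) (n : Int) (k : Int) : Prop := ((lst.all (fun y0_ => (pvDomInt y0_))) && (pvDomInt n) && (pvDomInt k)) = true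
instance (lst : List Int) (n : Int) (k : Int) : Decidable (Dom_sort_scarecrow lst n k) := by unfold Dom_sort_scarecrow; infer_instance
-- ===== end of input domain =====

-- B replaces A's sort-each-column-and-compare-rows check by a sort-free rank-dominance test
-- (for each adjacent column pair, count elements <= y on both sides for every y of the right column)
-- (objective: alternative; not faster).


-- ===== PORT A =====
def sort_scarecrow (lst : List Int) (n : Int) (k : Int) : Bool :=
  -- lst_arrs = [[] for _ in range(k)]; for i in range(n): lst_arrs[i%k].append(lst[i])
  let arrs := (PySem.List.pyRange 0 n 1).foldl (fun arrs i =>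
      let ost := PySem.Int.mod i k
      let row := (PySem.List.pyGet? arrs ost).getD []
      let x := (PySem.List.pyGet? lst i).getD 0
      arrs.set ost.toNat (row ++ [x]))
    ((PySem.List.pyRange 0 k 1).map (fun _ => ([] : List Int)))
  -- lst_arrs = list(map(sorted, lst_arrs))
  let cols := arrs.map (fun r => PySem.List.sorted r (fun x => x) false)
  -- nested loop with early 'return False' ported as nested .all
  (PySem.List.pyRange 0 (PySem.Int.floordiv n k + 1) 1).all (fun i =>
    (PySem.List.pyRange 0 (k - 1) 1).all (fun j =>
      let cj := (PySem.List.pyGet? cols j).getD []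
      let cj1 := (PySem.List.pyGet? cols (j + 1)).getD []
      if ((cj.length : Int) > i ∧ (cj1.length : Int) > i) then
        !decide (((PySem.List.pyGet? cj i).getD 0) > ((PySem.List.pyGet? cj1 i).getD 0))
      else true))

-- ===== PORT B =====
def sort_scarecrow_alt (lst : List Int) (n : Int) (k : Int) : Bool :=
  -- for j in range(k-1): a = [lst[i] for i in range(j, n, k)]; b = [lst[i] for i in range(j+1, n, k)]
  --   for y in b: if sum(x <= y for x in a) < sum(z <= y for z in b): return False
  -- (the 0/1-sums are counts; early 'return False' ported as nested .all)
  (PySem.List.pyRange 0 (k - 1) 1).all (fun j =>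
    let a := (PySem.List.pyRange j n k).map (fun i => (PySem.List.pyGet? lst i).getD 0)
    let b := (PySem.List.pyRange (j + 1) n k).map (fun i => (PySem.List.pyGet? lst i).getD 0)
    b.all (fun y =>
      !decide (a.countP (fun x => decide (x ≤ y)) < b.countP (fun z => decide (z ≤ y)))))

-- ===== PRECONDITION & SPEC =====
-- Pre_ excludes exactly the inputs where A raises: k = 0 (ZeroDivisionError from i%k / n//k),
-- k ≥ 1 with n > len(lst) (IndexError on lst[i]), and k < 0 with n > 0 (IndexError on the empty
-- bucket list); A returns everywhere else, i.e. on k ≥ 1 with n ≤ len(lst) and on k ≠ 0 with n ≤ 0.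
def Pre_sort_scarecrow (lst : List Int) (n : Int) (k : Int) : Prop :=
  (1 ≤ k ∧ n ≤ (lst.length : Int)) ∨ (k ≠ 0 ∧ n ≤ 0)
instance (lst : List Int) (n : Int) (k : Int) : Decidable (Pre_sort_scarecrow lst n k) := by
  unfold Pre_sort_scarecrow; infer_instance
def pvWitness_sort_scarecrow : List Int × Int × Int := ([3, 1, 4, 2], 4, 2)
def Spec_sort_scarecrow (lst : List Int) (n : Int) (k : Int) (out : Bool) : Prop := out = sort_scarecrow_alt lst n k
instance (lst : List Int) (n : Int) (k : Int) (out : Bool) : Decidable (Spec_sort_scarecrow lst n k out) := by unfold Spec_sort_scarecrow; infer_instance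

-- ===== CLAIM (what is proved, stated in full; the proofs are below) =====
def Claim_equal_sort_scarecrow : Prop := ∀ (lst : List Int) (n : Int) (k : Int), Dom_sort_scarecrow lst n k → Pre_sort_scarecrow lst n k → Spec_sort_scarecrow lst n k (sort_scarecrow lst n k)

-- ===== LEMMAS AND PROOFS =====

-- pvCol lst c m j = the values of residue column j among indices 0..m-1 (in index order)
def pvCol (lst : List Int) (c : Nat) : Nat → Nat → List Int
  | 0, _ => []
  | Nat.succ m, j => pvCol lst c m j ++ (if m % c = j then [lst.getD m 0] else [])

lemma pv_mod_shift (c j u : Nat) (hj : j < c) : (j + u) % c = j ↔ u % c = 0 := by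
  have hr : u % c < c := Nat.mod_lt _ (by omega)
  have h1 : (j + u) % c = (j + u % c) % c := by
    conv_lhs => rw [Nat.add_mod, Nat.mod_eq_of_lt hj]
  rcases Nat.lt_or_ge (j + u % c) c with h | h
  · rw [h1, Nat.mod_eq_of_lt h]; omega
  · rw [h1, Nat.mod_eq_sub_mod h, Nat.mod_eq_of_lt (by omega)]
    omega

lemma pv_col_len (lst : List Int) (c m j : Nat) (hc : 0 < c) (hj : j < c) :
    ∀ i, i < (pvCol lst c m j).length ↔ j + i * c < m := by
  induction m with
  | zero => intro i; simp [pvCol]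
  | succ m ih =>
    intro i
    by_cases hm : m % c = j
    · have hjm : j ≤ m := hm ▸ Nat.mod_le m c
      have hdvd : c ∣ (m - j) :=
        Nat.dvd_of_mod_eq_zero ((pv_mod_shift c j (m - j) hj).1
          (by rw [Nat.add_sub_cancel' hjm]; exact hm))
      obtain ⟨t, ht⟩ := hdvd
      set L := (pvCol lst c m j).length with hL
      have hm' : j + c * t = m := by omega
      have hub : m ≤ j + L * c := by
        have := (ih L).not
        simp at this
        omega
      have htL : t ≤ L := by
        have h2 : c * t ≤ c * L := by rw [mul_comm c L]; omega
        exact Nat.le_of_mul_le_mul_left h2 hc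
      have hLt : L ≤ t := by
        rcases Nat.eq_zero_or_pos L with h0 | h0
        · omega
        · have hlb : j + (L - 1) * c < m := (ih (L - 1)).1 (by omega)
          have h2 : c * (L - 1) < c * t := by rw [mul_comm c (L - 1)]; omega
          have := Nat.lt_of_mul_lt_mul_left h2
          omega
      have hmL : m = j + L * c := by
        have heq : t = L := le_antisymm htL hLt
        rw [heq] at hm'
        rw [mul_comm] at hm'
        omega
      simp [pvCol, hm, ← hL]
      constructor
      · intro h
        have h1 : i ≤ L := by omega
        have := Nat.mul_le_mul_right c h1
        omega
      · intro h
        have hic : i * c ≤ L * c := by omega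
        have : i ≤ L := Nat.le_of_mul_le_mul_right hic hc
        omega
    · have hne : j + i * c ≠ m := by
        intro h
        exact hm (by rw [← h, pv_mod_shift c j (i * c) hj, Nat.mul_mod_left])
      have := ih i
      simp [pvCol, hm]
      omega

lemma pv_range_len_iff (c j m : Nat) (hc : 0 < c) (hj : j < c) (i : Nat) :
    i < (PySem.List.pyRange (j : Int) (m : Int) (c : Int)).length ↔ j + i * c < m := by
  have hcI : (0 : Int) < (c : Int) := by exact_mod_cast hc
  rw [PySem.List.pyRange_of_pos _ _ hcI, List.length_map, List.length_range]
  by_cases hjm : (j : Int) < (m : Int)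
  · have hjm' : j < m := by exact_mod_cast hjm
    have hnum : (m : Int) - j + c - 1 = ((m - j + c - 1 : Nat) : Int) := by omega
    rw [if_pos hjm, hnum, ← Int.natCast_div, Int.toNat_natCast]
    rw [show (i < (m - j + c - 1) / c ↔ i + 1 ≤ (m - j + c - 1) / c) from Iff.rfl,
        Nat.le_div_iff_mul_le hc, Nat.succ_mul]
    omega
  · rw [if_neg hjm]
    constructor
    · omega
    · intro h; exfalso; omega

lemma pv_col_get (lst : List Int) (c m j : Nat) (hc : 0 < c) (hj : j < c) :
    ∀ t, j + t * c < m → (pvCol lst c m j)[t]? = some (lst.getD (j + t * c) 0) := by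
  induction m with
  | zero => intro t ht; omega
  | succ m ih =>
    intro t ht
    by_cases hlt : j + t * c < m
    · have hlen : t < (pvCol lst c m j).length := (pv_col_len lst c m j hc hj t).2 hlt
      simp only [pvCol]
      rw [List.getElem?_append_left hlen]
      exact ih t hlt
    · have heq : j + t * c = m := by omega
      have hm : m % c = j := by
        rw [← heq, pv_mod_shift c j (t * c) hj, Nat.mul_mod_left]
      have hub : m ≤ j + (pvCol lst c m j).length * c := by
        have h2 := pv_col_len lst c m j hc hj (pvCol lst c m j).length
        omega
      have hL : (pvCol lst c m j).length = t := by
        rcases lt_trichotomy (pvCol lst c m j).length t with h | h | h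
        · exfalso
          have h3 : ((pvCol lst c m j).length + 1) * c ≤ t * c :=
            Nat.mul_le_mul_right c (by omega)
          rw [Nat.succ_mul] at h3
          omega
        · exact h
        · exact absurd ((pv_col_len lst c m j hc hj t).1 h) hlt
      simp only [pvCol, hm]
      rw [List.getElem?_append_right (by omega), hL]
      simp [heq]

lemma pv_bcol (lst : List Int) (c m j : Nat) (hc : 0 < c) (hj : j < c) :
    (PySem.List.pyRange (j : Int) (m : Int) (c : Int)).map (fun i => (PySem.List.pyGet? lst i).getD 0)
      = pvCol lst c m j := by
  have hcI : (0 : Int) < (c : Int) := by exact_mod_cast hc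
  apply List.ext_getElem?
  intro t
  by_cases ht : j + t * c < m
  · have h1 : t < (PySem.List.pyRange (j : Int) (m : Int) (c : Int)).length :=
      (pv_range_len_iff c j m hc hj t).2 ht
    have hval : (PySem.List.pyRange (j : Int) (m : Int) (c : Int))[t]? = some ((j : Int) + c * t) := by
      rw [PySem.List.pyRange_of_pos _ _ hcI] at h1 ⊢
      rw [List.length_map, List.length_range] at h1
      rw [List.getElem?_map, List.getElem?_range h1]
      rfl
    rw [List.getElem?_map, hval, pv_col_get lst c m j hc hj t ht]
    have hcast : (j : Int) + c * t = ((j + t * c : Nat) : Int) := by push_cast; ring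
    rw [Option.map_some, hcast, PySem.List.pyGet?_natCast]
    simp [List.getD_eq_getElem?_getD]
  · have h1 : ¬ t < (PySem.List.pyRange (j : Int) (m : Int) (c : Int)).length := by
      rw [pv_range_len_iff c j m hc hj t]; exact ht
    have h2 : ¬ t < (pvCol lst c m j).length := by
      rw [pv_col_len lst c m j hc hj t]; exact ht
    rw [List.getElem?_map]
    rw [List.getElem?_eq_none (by omega : (PySem.List.pyRange (j : Int) (m : Int) (c : Int)).length ≤ t),
        List.getElem?_eq_none (by omega : (pvCol lst c m j).length ≤ t)]
    rfl

lemma pv_abuckets (lst : List Int) (c : Nat) (hc : 0 < c) : ∀ (m : Nat),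
    (PySem.List.pyRange 0 (m : Int) 1).foldl (fun arrs i =>
        arrs.set (PySem.Int.mod i (c : Int)).toNat
          ((PySem.List.pyGet? arrs (PySem.Int.mod i (c : Int))).getD []
            ++ [(PySem.List.pyGet? lst i).getD 0]))
      ((PySem.List.pyRange 0 (c : Int) 1).map (fun _ => ([] : List Int)))
    = (List.range c).map (fun j => pvCol lst c m j) := by
  intro m
  induction m with
  | zero =>
    rw [Nat.cast_zero, PySem.List.pyRange_one_eq_nil (le_refl 0), List.foldl_nil,
        PySem.List.pyRange_zero_nat, List.map_map]
    simp [Function.comp_def, pvCol]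
  | succ m ih =>
    rw [Nat.cast_succ, PySem.List.pyRange_one_succ_right (by positivity), List.foldl_append,
        List.foldl_cons, List.foldl_nil, ih]
    have hmod : PySem.Int.mod (m : Int) (c : Int) = ((m % c : Nat) : Int) :=
      PySem.Int.mod_natCast m c
    have hmc : m % c < c := Nat.mod_lt _ hc
    simp only [hmod, Int.toNat_natCast, PySem.List.pyGet?_natCast]
    have hrow : ((List.range c).map (fun j => pvCol lst c m j))[(m % c : Nat)]?.getD []
        = pvCol lst c m (m % c) := by
      rw [List.getElem?_map, List.getElem?_range hmc]
      rfl
    rw [hrow]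
    apply List.ext_getElem
    · simp
    · intro q hq1 hq2
      have hq : q < c := by simpa using hq2
      rw [List.getElem_set]
      by_cases hqm : m % c = q
      · rw [if_pos hqm]
        subst hqm
        simp [pvCol, List.getD_eq_getElem?_getD]
      · rw [if_neg hqm]
        simp [pvCol, hqm]

def pvCols (lst : List Int) (c m : Nat) : List (List Int) :=
  (List.range c).map (fun j => PySem.List.sorted (pvCol lst c m j) (fun x => x) false)

lemma pv_cj (lst : List Int) (c m J : Nat) (hJ : J < c) :
    (PySem.List.pyGet? (pvCols lst c m) (J : Int)).getD []
      = PySem.List.sorted (pvCol lst c m J) (fun x => x) false := by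
  rw [PySem.List.pyGet?_natCast]
  simp [pvCols, List.getElem?_map, List.getElem?_range hJ]

-- in a ≤-sorted list, the entries ≤ y are exactly the first countP-many
lemma pv_cnt_le (l : List Int) (hl : l.Pairwise (· ≤ ·)) (y : Int) :
    ∀ i, i < l.length → (l.getD i 0 ≤ y ↔ i < l.countP (fun x => decide (x ≤ y))) := by
  induction l with
  | nil => intro i hi; simp at hi
  | cons x t ih =>
    obtain ⟨hx, ht⟩ := List.pairwise_cons.1 hl
    intro i hi
    have hgetD : ∀ i' (h : i' < t.length), t.getD i' 0 = t[i']'h := by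
      intro i' hi'
      simp [List.getD_eq_getElem?_getD, List.getElem?_eq_getElem hi']
    cases i with
    | zero =>
      rw [List.getD_cons_zero]
      by_cases hxy : x ≤ y
      · simp [List.countP_cons, hxy]
      · have ht0 : t.countP (fun x => decide (x ≤ y)) = 0 := by
          rw [List.countP_eq_zero]
          intro z hz
          simp only [decide_eq_true_eq]
          have := hx z hz
          omega
        simp [List.countP_cons, hxy, ht0]
    | succ i' =>
      have hi' : i' < t.length := by simpa using hi
      rw [List.getD_cons_succ]
      by_cases hxy : x ≤ y
      · rw [ih ht i' hi']
        simp [List.countP_cons, hxy]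
      · have ht0 : t.countP (fun x => decide (x ≤ y)) = 0 := by
          rw [List.countP_eq_zero]
          intro z hz
          simp only [decide_eq_true_eq]
          have := hx z hz
          omega
        have hmem : t.getD i' 0 ∈ t := by
          rw [hgetD i' hi']
          exact List.getElem_mem _
        have hle := hx _ hmem
        have hno : ¬ t.getD i' 0 ≤ y := by omega
        have hcnt : (x :: t).countP (fun x => decide (x ≤ y)) = 0 := by
          simp [List.countP_cons, hxy, ht0]
        rw [hcnt]
        exact ⟨fun h => absurd h hno, fun h => absurd h (by omega)⟩

-- rank-dominance characterization of the row-wise order of two sorted lists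
lemma pv_dom (a b : List Int) (ha : a.Pairwise (· ≤ ·)) (hb : b.Pairwise (· ≤ ·))
    (hlen : b.length ≤ a.length) :
    (∀ i, i < b.length → a.getD i 0 ≤ b.getD i 0)
      ↔ (∀ y ∈ b, b.countP (fun z => decide (z ≤ y)) ≤ a.countP (fun x => decide (x ≤ y))) := by
  constructor
  · intro h y hy
    by_contra hcon
    push_neg at hcon
    set ca := a.countP (fun x => decide (x ≤ y)) with hca
    have hcb : ca < b.countP (fun z => decide (z ≤ y)) := hcon
    have hlb : ca < b.length := lt_of_lt_of_le hcb List.countP_le_length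
    have h1 : b.getD ca 0 ≤ y := (pv_cnt_le b hb y ca hlb).2 hcb
    have h2 : a.getD ca 0 ≤ y := le_trans (h ca hlb) h1
    have := (pv_cnt_le a ha y ca (lt_of_lt_of_le hlb hlen)).1 h2
    omega
  · intro h i hi
    have hmem : b.getD i 0 ∈ b := by
      rw [List.getD_eq_getElem?_getD, List.getElem?_eq_getElem hi]
      exact List.getElem_mem hi
    have hcb : i < b.countP (fun z => decide (z ≤ b.getD i 0)) :=
      (pv_cnt_le b hb _ i hi).1 le_rfl
    have hca : i < a.countP (fun x => decide (x ≤ b.getD i 0)) :=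
      lt_of_lt_of_le hcb (h _ hmem)
    exact (pv_cnt_le a ha _ i (lt_of_lt_of_le hi hlen)).2 hca

-- per adjacent column pair: A's row-wise check on the sorted columns ⟺ B's counting check
lemma pv_pair (lst : List Int) (c m J : Nat) (hc : 0 < c) (hJ1 : J + 1 < c) :
    (∀ i, i < (PySem.List.sorted (pvCol lst c m (J + 1)) (fun x => x) false).length →
        (PySem.List.sorted (pvCol lst c m J) (fun x => x) false).getD i 0
          ≤ (PySem.List.sorted (pvCol lst c m (J + 1)) (fun x => x) false).getD i 0)
    ↔ (∀ y ∈ pvCol lst c m (J + 1),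
        (pvCol lst c m (J + 1)).countP (fun z => decide (z ≤ y))
          ≤ (pvCol lst c m J).countP (fun x => decide (x ≤ y))) := by
  have hJ : J < c := by omega
  have ha : (PySem.List.sorted (pvCol lst c m J) (fun x => x) false).Pairwise (· ≤ ·) := by
    simpa using PySem.List.sorted_pairwise (pvCol lst c m J) (fun x => x)
  have hb : (PySem.List.sorted (pvCol lst c m (J + 1)) (fun x => x) false).Pairwise (· ≤ ·) := by
    simpa using PySem.List.sorted_pairwise (pvCol lst c m (J + 1)) (fun x => x)
  have hlen : (PySem.List.sorted (pvCol lst c m (J + 1)) (fun x => x) false).length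
      ≤ (PySem.List.sorted (pvCol lst c m J) (fun x => x) false).length := by
    rw [PySem.List.length_sorted, PySem.List.length_sorted]
    by_contra hcon
    push_neg at hcon
    set L := (pvCol lst c m J).length with hL
    have h1 : L < (pvCol lst c m (J + 1)).length := hcon
    have h2 : J + 1 + L * c < m := (pv_col_len lst c m (J + 1) hc hJ1 L).1 h1
    have h3 : L < (pvCol lst c m J).length := (pv_col_len lst c m J hc hJ L).2 (by omega)
    omega
  rw [pv_dom _ _ ha hb hlen]
  have hperm : (PySem.List.sorted (pvCol lst c m (J + 1)) (fun x => x) false).Perm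
      (pvCol lst c m (J + 1)) := PySem.List.sorted_perm _ _ _
  have hperma : (PySem.List.sorted (pvCol lst c m J) (fun x => x) false).Perm
      (pvCol lst c m J) := PySem.List.sorted_perm _ _ _
  constructor
  · intro h y hy
    have := h y (hperm.mem_iff.2 hy)
    rwa [hperm.countP_eq, hperma.countP_eq] at this
  · intro h y hy
    have := h y (hperm.mem_iff.1 hy)
    rwa [hperm.countP_eq, hperma.countP_eq]


-- A's nested guarded row-wise check over the sorted columns ⟺ B's per-pair counting check
lemma pv_check (lst : List Int) (c m : Nat) (hc : 0 < c) :
    ((PySem.List.pyRange 0 (((m / c : Nat) : Int) + 1) 1).all (fun i =>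
      (PySem.List.pyRange 0 ((c : Int) - 1) 1).all (fun j =>
        if ((((PySem.List.pyGet? (pvCols lst c m) j).getD []).length : Int) > i ∧
            (((PySem.List.pyGet? (pvCols lst c m) (j + 1)).getD []).length : Int) > i) then
          !decide (((PySem.List.pyGet? ((PySem.List.pyGet? (pvCols lst c m) j).getD []) i).getD 0)
              > ((PySem.List.pyGet? ((PySem.List.pyGet? (pvCols lst c m) (j + 1)).getD []) i).getD 0))
        else true)))
    = ((PySem.List.pyRange 0 ((c : Int) - 1) 1).all (fun j =>
        ((PySem.List.pyRange (j + 1) (m : Int) (c : Int)).map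
            (fun i => (PySem.List.pyGet? lst i).getD 0)).all (fun y =>
          !decide (((PySem.List.pyRange j (m : Int) (c : Int)).map
                (fun i => (PySem.List.pyGet? lst i).getD 0)).countP (fun x => decide (x ≤ y))
              < ((PySem.List.pyRange (j + 1) (m : Int) (c : Int)).map
                (fun i => (PySem.List.pyGet? lst i).getD 0)).countP (fun z => decide (z ≤ y)))))) := by
  rw [Bool.eq_iff_iff]
  simp only [List.all_eq_true, PySem.List.mem_pyRange_one]
  constructor
  · intro hA j hj
    obtain ⟨hj0, hj1⟩ := hj
    set J := j.toNat with hJdef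
    have hjJ : (J : Int) = j := Int.toNat_of_nonneg hj0
    have hJ1 : J + 1 < c := by omega
    have hJc : J < c := by omega
    have hcast1 : ((J : Nat) : Int) + 1 = ((J + 1 : Nat) : Int) := by push_cast; ring
    rw [← hjJ]
    simp only [hcast1, pv_bcol lst c m (J + 1) hc hJ1, pv_bcol lst c m J hc hJc]
    intro y hy
    have hrow : ∀ i, i < (PySem.List.sorted (pvCol lst c m (J + 1)) (fun x => x) false).length →
        (PySem.List.sorted (pvCol lst c m J) (fun x => x) false).getD i 0
          ≤ (PySem.List.sorted (pvCol lst c m (J + 1)) (fun x => x) false).getD i 0 := by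
      intro i hilen
      rw [PySem.List.length_sorted] at hilen
      have hi1 : J + 1 + i * c < m := (pv_col_len lst c m (J + 1) hc hJ1 i).1 hilen
      have hileni : i < (pvCol lst c m J).length :=
        (pv_col_len lst c m J hc hJc i).2 (by omega)
      have hidiv : i ≤ m / c := (Nat.le_div_iff_mul_le hc).2 (by omega)
      have hA' := hA (i : Int) ⟨by positivity, by exact_mod_cast Nat.lt_succ_of_le hidiv⟩
        j ⟨hj0, hj1⟩
      rw [← hjJ] at hA'
      simp only [hcast1, pv_cj lst c m J hJc, pv_cj lst c m (J + 1) hJ1] at hA'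
      rw [if_pos ⟨by rw [PySem.List.length_sorted]; exact_mod_cast hileni,
            by rw [PySem.List.length_sorted]; exact_mod_cast hilen⟩] at hA'
      simp only [Bool.not_eq_true', decide_eq_false_iff_not, not_lt] at hA'
      rw [PySem.List.pyGet?_natCast, PySem.List.pyGet?_natCast] at hA'
      rw [List.getD_eq_getElem?_getD, List.getD_eq_getElem?_getD]
      exact hA'
    have hcnt := (pv_pair lst c m J hc hJ1).1 hrow y hy
    simp only [Bool.not_eq_true', decide_eq_false_iff_not, not_lt]
    exact hcnt
  · intro hB i hi j hj
    obtain ⟨hi0, hi1⟩ := hi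
    obtain ⟨hj0, hj1⟩ := hj
    set I := i.toNat with hIdef
    set J := j.toNat with hJdef
    have hiI : (I : Int) = i := Int.toNat_of_nonneg hi0
    have hjJ : (J : Int) = j := Int.toNat_of_nonneg hj0
    have hJ1 : J + 1 < c := by omega
    have hJc : J < c := by omega
    have hcast1 : ((J : Nat) : Int) + 1 = ((J + 1 : Nat) : Int) := by push_cast; ring
    rw [← hjJ, ← hiI]
    simp only [hcast1, pv_cj lst c m J hJc, pv_cj lst c m (J + 1) hJ1]
    by_cases hg : (((PySem.List.sorted (pvCol lst c m J) (fun x => x) false).length : Int) > (I : Int) ∧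
        ((PySem.List.sorted (pvCol lst c m (J + 1)) (fun x => x) false).length : Int) > (I : Int))
    · rw [if_pos hg]
      have hB' := hB j ⟨hj0, hj1⟩
      rw [← hjJ] at hB'
      simp only [hcast1, pv_bcol lst c m (J + 1) hc hJ1, pv_bcol lst c m J hc hJc] at hB'
      have hcnts : ∀ y ∈ pvCol lst c m (J + 1),
          (pvCol lst c m (J + 1)).countP (fun z => decide (z ≤ y))
            ≤ (pvCol lst c m J).countP (fun x => decide (x ≤ y)) := by
        intro y hy
        have := hB' y hy
        simpa using this
      have hrow := (pv_pair lst c m J hc hJ1).2 hcnts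
      have hIlen : I < (PySem.List.sorted (pvCol lst c m (J + 1)) (fun x => x) false).length := by
        exact_mod_cast hg.2
      have hle := hrow I hIlen
      simp only [Bool.not_eq_true', decide_eq_false_iff_not, not_lt]
      rw [PySem.List.pyGet?_natCast, PySem.List.pyGet?_natCast]
      rw [List.getD_eq_getElem?_getD, List.getD_eq_getElem?_getD] at hle
      exact hle
    · rw [if_neg hg]

-- ===== VERDICT (by name: the statement is the Claim_ definition above) =====
theorem sort_scarecrow_spec : Claim_equal_sort_scarecrow := by
  intro lst n k hdom hpre
  show sort_scarecrow lst n k = sort_scarecrow_alt lst n k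
  by_cases hk : 1 ≤ k
  case neg =>
    have hkneg : k ≤ -1 := by
      rcases hpre with ⟨h, _⟩ | ⟨h, _⟩ <;> omega
    have hA : PySem.List.pyRange 0 (k - 1) 1 = [] := PySem.List.pyRange_one_eq_nil (by omega)
    simp only [sort_scarecrow, sort_scarecrow_alt, hA, List.all_nil]
    simp [List.all_eq_true]
  have hn : n ≤ (lst.length : Int) := by
    rcases hpre with ⟨_, h⟩ | ⟨_, h⟩
    · exact h
    · have h0 : (0 : Int) ≤ (lst.length : Int) := by positivity
      omega
  have hc : 0 < k.toNat := by omega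
  have hkc : k = (k.toNat : Int) := by omega
  rcases lt_or_ge n 0 with hneg | hpos
  · -- n < 0: both sides are vacuously true
    have hA : PySem.List.pyRange 0 (PySem.Int.floordiv n k + 1) 1 = [] := by
      apply PySem.List.pyRange_one_eq_nil
      have := (PySem.Int.floordiv_lt_iff_lt_mul (a := n) (q := 0) (by omega : (0:Int) < k)).2
        (by omega : n < 0 * k)
      omega
    simp only [sort_scarecrow, sort_scarecrow_alt, hA, List.all_nil]
    rw [Eq.comm, List.all_eq_true]
    intro j hj
    rw [List.all_eq_true]
    intro y hy
    exfalso
    obtain ⟨i, hi, _⟩ := List.mem_map.1 hy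
    rw [PySem.List.mem_pyRange_iff_of_pos] at hi
    · rw [PySem.List.mem_pyRange_one] at hj
      omega
    · omega
  · set c := k.toNat with hcdef
    set m := n.toNat with hmdef
    have hnm : n = (m : Int) := by omega
    rw [hnm, hkc]
    simp only [sort_scarecrow, sort_scarecrow_alt]
    have hcols : (((PySem.List.pyRange 0 (m : Int) 1).foldl (fun arrs i =>
          arrs.set (PySem.Int.mod i (c : Int)).toNat
            ((PySem.List.pyGet? arrs (PySem.Int.mod i (c : Int))).getD []
              ++ [(PySem.List.pyGet? lst i).getD 0]))
        ((PySem.List.pyRange 0 (c : Int) 1).map (fun _ => ([] : List Int)))).map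
          (fun r => PySem.List.sorted r (fun x => x) false)) = pvCols lst c m := by
      rw [pv_abuckets lst c hc m, List.map_map]
      rfl
    rw [hcols, PySem.Int.floordiv_natCast]
    exact pv_check lst c m hc
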